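-- pv_equiv track=rewrite | github.com/NinjaKen99/50.053-Fuzzer | mutations.py | remove_null_byte
-- ===== SOURCE A (Python) =====
-- def remove_null_byte(input:list):
--     new_list =  []
--     first = False
--     for x in input:
--         if first == False and x == "00000000":
--             continue
--         elif first == True and x == "00000000":
--             new_list.append(chr(int("00100000", 2)))
--         else:
--             new_list.append(chr(int(x, 2)))
--             first = True
--     return ''.join(new_list)
-- ===== SOURCE B (Python) =====
-- def remove_null_byte(input: list):
--     # Phase 1: find the end of the leading null-byte prefix.
--     n = 0
--     while n < len(input) and input[n] == "00000000":
--         n += 1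
--     # Phase 2: uniform map over the tail: nulls become a space, others decode.
--     return ''.join(' ' if x == "00000000" else chr(int(x, 2)) for x in input[n:])
-- ===== Notes on version B (the rewrite author's own statement) =====
-- stated objective: simpler
-- what changed: Replaces the single stateful flag-driven loop by two phases: drop the leading '00000000' prefix, then a uniform map (null->space, else chr(int(x,2))) joined once; Pre_ excludes elements that int(x,2) cannot parse or whose value is outside chr's range (A raises ValueError there) and surrogate code points 0xD800-0xDFFF, where A returns a lone-surrogate string not representable as a Lean/UTF-8 String.
import Mathlib
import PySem

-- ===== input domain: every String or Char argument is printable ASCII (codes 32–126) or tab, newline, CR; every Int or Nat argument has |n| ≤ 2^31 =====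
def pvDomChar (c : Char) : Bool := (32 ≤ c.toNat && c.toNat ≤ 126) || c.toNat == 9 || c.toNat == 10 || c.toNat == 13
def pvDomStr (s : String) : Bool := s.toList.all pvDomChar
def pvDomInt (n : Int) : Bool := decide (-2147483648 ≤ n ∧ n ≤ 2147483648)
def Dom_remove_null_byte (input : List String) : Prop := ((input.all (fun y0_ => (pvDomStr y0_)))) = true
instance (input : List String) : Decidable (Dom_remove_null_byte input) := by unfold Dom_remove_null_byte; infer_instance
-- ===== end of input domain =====

-- B replaces A's stateful flag-driven loop by two phases (drop the leading null prefix, then one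
-- uniform map joined once); objective: simpler, same cost.


-- ===== PORT A =====
-- chr(int(x, 2)); Pre_ guarantees the parse succeeds and the value is a valid (non-surrogate) code point.
def remove_null_byte (input : List String) : String :=
  let r := input.foldl (fun (st : List Char × Bool) x =>
      if st.2 == false && x == "00000000" then st
      else if st.2 == true && x == "00000000" then
        (st.1 ++ [Char.ofNat ((PySem.Int.ofStrBase? "00100000" 2).getD 0).toNat], st.2)
      else
        (st.1 ++ [Char.ofNat ((PySem.Int.ofStrBase? x 2).getD 0).toNat], true))
    ([], false)
  String.mk r.1

-- ===== PORT B =====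
-- phase 1 of Source B: the while loop that skips the leading "00000000" prefix (input[n:]).
def pvDropNulls : List String → List String
  | [] => []
  | x :: xs => if x == "00000000" then pvDropNulls xs else x :: xs

def remove_null_byte_alt (input : List String) : String :=
  String.mk ((pvDropNulls input).map (fun x =>
    if x == "00000000" then ' '
    else Char.ofNat ((PySem.Int.ofStrBase? x 2).getD 0).toNat))

-- ===== PRECONDITION & SPEC =====
-- Pre_ excludes elements int(x,2) cannot parse or whose value is outside chr's range (A raises
-- ValueError there), and surrogate code points 0xD800–0xDFFF, where A returns a lone-surrogate
-- string that is not representable as a Lean/UTF-8 String.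
def pvOkElem (x : String) : Bool :=
  match PySem.Int.ofStrBase? x 2 with
  | some v => decide (0 ≤ v ∧ (v < 55296 ∨ (57343 < v ∧ v < 1114112)))
  | none => false

def Pre_remove_null_byte (input : List String) : Prop := input.all pvOkElem = true
instance (input : List String) : Decidable (Pre_remove_null_byte input) := by
  unfold Pre_remove_null_byte; infer_instance

def pvWitness_remove_null_byte : List String := ["00000000", "01100001", "00000000", "01100010"]

def Spec_remove_null_byte (input : List String) (out : String) : Prop := out = remove_null_byte_alt input
instance (input : List String) (out : String) : Decidable (Spec_remove_null_byte input out) := by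
  unfold Spec_remove_null_byte; infer_instance

-- ===== CLAIM (what is proved, stated in full; the proofs are below) =====
def Claim_equal_remove_null_byte : Prop := ∀ (input : List String), Dom_remove_null_byte input → Pre_remove_null_byte input → Spec_remove_null_byte input (remove_null_byte input)

-- ===== LEMMAS AND PROOFS =====
-- once A's flag is true, the rest of the fold appends exactly B's uniform map
lemma pv_loop_true (xs : List String) (acc : List Char) :
    xs.foldl (fun (st : List Char × Bool) x =>
      if st.2 == false && x == "00000000" then st
      else if st.2 == true && x == "00000000" then
        (st.1 ++ [Char.ofNat ((PySem.Int.ofStrBase? "00100000" 2).getD 0).toNat], st.2)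
      else
        (st.1 ++ [Char.ofNat ((PySem.Int.ofStrBase? x 2).getD 0).toNat], true))
      (acc, true)
    = (acc ++ xs.map (fun x =>
        if x == "00000000" then ' '
        else Char.ofNat ((PySem.Int.ofStrBase? x 2).getD 0).toNat), true) := by
  induction xs generalizing acc with
  | nil => simp
  | cons x xs ih =>
    simp only [List.foldl_cons, List.map_cons]
    by_cases hx : x = "00000000"
    · subst hx
      rw [if_neg (by decide), if_pos (by decide), ih]
      simp [show Char.ofNat ((PySem.Int.ofStrBase? "00100000" 2).getD 0).toNat = ' ' from by decide]
    · have hb : (x == ("00000000" : String)) = false := by simp [hx]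
      rw [if_neg (by simp [hb]), if_neg (by simp [hb]), ih]
      simp [hx]

-- while the flag is false: leading nulls are skipped, the first non-null switches to the true state
lemma pv_loop_false (xs : List String) :
    (xs.foldl (fun (st : List Char × Bool) x =>
      if st.2 == false && x == "00000000" then st
      else if st.2 == true && x == "00000000" then
        (st.1 ++ [Char.ofNat ((PySem.Int.ofStrBase? "00100000" 2).getD 0).toNat], st.2)
      else
        (st.1 ++ [Char.ofNat ((PySem.Int.ofStrBase? x 2).getD 0).toNat], true))
      ([], false)).1
    = (pvDropNulls xs).map (fun x =>
        if x == "00000000" then ' '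
        else Char.ofNat ((PySem.Int.ofStrBase? x 2).getD 0).toNat) := by
  induction xs with
  | nil => simp [pvDropNulls]
  | cons x xs ih =>
    by_cases hx : x = "00000000"
    · subst hx
      simp only [List.foldl_cons, pvDropNulls]
      rw [if_pos (by decide)]
      simpa using ih
    · have hb : (x == ("00000000" : String)) = false := by simp [hx]
      simp only [List.foldl_cons, pvDropNulls]
      rw [if_neg (by simp [hb]), if_neg (by simp [hb]), if_neg (by simp [hb]), pv_loop_true]
      simp [hx]

-- ===== VERDICT (by name: the statement is the Claim_ definition above) =====
theorem remove_null_byte_spec : Claim_equal_remove_null_byte := by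
  intro input _ _
  unfold Spec_remove_null_byte remove_null_byte remove_null_byte_alt
  simp only [pv_loop_false]
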